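-- pv_equiv track=rewrite | github.com/grasp-technologies/grasp-agents | src/grasp_agents/tools/file_edit/fuzzy_match.py | _calculate_line_positions
-- ===== SOURCE A (Python) =====
-- def _calculate_line_positions(
--     content_lines: list[str],
--     start_line: int,
--     end_line: int,
--     content_length: int,
-- ) -> tuple[int, int]:
--     """Translate ``(start_line, end_line)`` to character offsets in the original."""
--     start_pos = sum(len(line) + 1 for line in content_lines[:start_line])
--     end_pos = sum(len(line) + 1 for line in content_lines[:end_line]) - 1
--     end_pos = min(content_length, end_pos)
--     return start_pos, end_pos
-- ===== SOURCE B (Python) =====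
-- def _clamp(n, i):
--     if i < 0:
--         i += n
--     return min(n, max(0, i))
--
--
-- def _calculate_line_positions(
--     content_lines: list[str],
--     start_line: int,
--     end_line: int,
--     content_length: int,
-- ) -> tuple[int, int]:
--     """Translate ``(start_line, end_line)`` to character offsets in the original."""
--     offsets = [0]
--     total = 0
--     for line in content_lines:
--         total += len(line) + 1
--         offsets.append(total)
--     n = len(content_lines)
--     start_pos = offsets[_clamp(n, start_line)]
--     end_pos = offsets[_clamp(n, end_line)] - 1
--     return start_pos, min(content_length, end_pos)
-- ===== Notes on version B (the rewrite author's own statement) =====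
-- stated objective: alternative
-- what changed: Replaces the two slice-and-sum passes with a single forward pass building a cumulative offset table, then resolves both line indices by arithmetic clamping (reproducing slice semantics) and table lookup.
import Mathlib
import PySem

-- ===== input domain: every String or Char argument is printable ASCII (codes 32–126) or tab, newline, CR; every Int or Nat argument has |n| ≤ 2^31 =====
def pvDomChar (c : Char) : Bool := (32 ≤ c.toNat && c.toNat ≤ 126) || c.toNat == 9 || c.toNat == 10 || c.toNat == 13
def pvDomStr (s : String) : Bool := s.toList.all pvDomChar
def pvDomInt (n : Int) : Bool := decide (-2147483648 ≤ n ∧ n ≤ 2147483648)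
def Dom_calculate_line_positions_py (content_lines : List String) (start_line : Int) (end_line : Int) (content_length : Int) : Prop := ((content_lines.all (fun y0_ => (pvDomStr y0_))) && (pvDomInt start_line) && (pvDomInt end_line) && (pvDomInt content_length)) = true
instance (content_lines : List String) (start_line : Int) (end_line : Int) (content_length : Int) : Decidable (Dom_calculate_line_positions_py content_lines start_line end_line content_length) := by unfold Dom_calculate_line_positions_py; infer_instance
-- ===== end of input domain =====

-- B replaces A's two slice-and-sum passes by one cumulative-offset pass plus arithmetic
-- index clamping (same cost class; a different decomposition). Return values only, no mutation.

-- ===== PORT A =====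
def calculate_line_positions_py (content_lines : List String) (start_line : Int) (end_line : Int) (content_length : Int) : Int × Int :=
  let start_pos := (PySem.List.slice content_lines none (some start_line)).foldl
    (fun acc line => acc + (PySem.Str.len line + 1)) 0
  let end_pos := (PySem.List.slice content_lines none (some end_line)).foldl
    (fun acc line => acc + (PySem.Str.len line + 1)) 0 - 1
  let end_pos := min content_length end_pos
  (start_pos, end_pos)

-- ===== PORT B =====
def pvClamp (n : Int) (i : Int) : Int :=
  let i := if i < 0 then i + n else i
  min n (max 0 i)

def calculate_line_positions_py_alt (content_lines : List String) (start_line : Int) (end_line : Int) (content_length : Int) : Int × Int :=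
  let st := content_lines.foldl
    (fun (p : List Int × Int) line =>
      let total := p.2 + (PySem.Str.len line + 1)
      (p.1 ++ [total], total)) ([0], 0)
  let offsets := st.1
  let n : Int := content_lines.length
  -- the clamped index is always in range, so Python's offsets[...] never raises; pyGetD's default is never used
  let start_pos := PySem.List.pyGetD offsets (pvClamp n start_line) 0
  let end_pos := PySem.List.pyGetD offsets (pvClamp n end_line) 0 - 1
  (start_pos, min content_length end_pos)

-- ===== PRECONDITION & SPEC =====
def Spec_calculate_line_positions_py (content_lines : List String) (start_line : Int) (end_line : Int) (content_length : Int) (out : Int × Int) : Prop := out = calculate_line_positions_py_alt content_lines start_line end_line content_length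
instance (content_lines : List String) (start_line : Int) (end_line : Int) (content_length : Int) (out : Int × Int) : Decidable (Spec_calculate_line_positions_py content_lines start_line end_line content_length out) := by unfold Spec_calculate_line_positions_py; infer_instance

-- ===== CLAIM (what is proved, stated in full; the proofs are below) =====
def Claim_equal_calculate_line_positions_py : Prop := ∀ (content_lines : List String) (start_line : Int) (end_line : Int) (content_length : Int), Dom_calculate_line_positions_py content_lines start_line end_line content_length → Spec_calculate_line_positions_py content_lines start_line end_line content_length (calculate_line_positions_py content_lines start_line end_line content_length)

-- ===== LEMMAS AND PROOFS =====

-- prefix sums that B's foldl appends after the initial [0]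
def pvAux : List String → Int → List Int
  | [], _ => []
  | l :: t, a => (a + (PySem.Str.len l + 1)) :: pvAux t (a + (PySem.Str.len l + 1))

theorem pvFold_eq : ∀ (xs : List String) (acc : List Int) (t : Int),
    (xs.foldl (fun (p : List Int × Int) line =>
      let total := p.2 + (PySem.Str.len line + 1)
      (p.1 ++ [total], total)) (acc, t)).1 = acc ++ pvAux xs t := by
  intro xs
  induction xs with
  | nil => intro acc t; simp [pvAux]
  | cons l ls ih =>
    intro acc t
    simp only [List.foldl_cons]
    rw [ih]
    simp [pvAux]

theorem pvAux_get : ∀ (xs : List String) (a : Int) (j : Nat), j < xs.length →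
    (pvAux xs a)[j]? = some ((xs.take (j + 1)).foldl (fun acc l => acc + (PySem.Str.len l + 1)) a) := by
  intro xs
  induction xs with
  | nil => intro a j h; simp at h
  | cons l t ih =>
    intro a j h
    cases j with
    | zero => simp [pvAux]
    | succ j =>
      simp only [pvAux, List.getElem?_cons_succ, List.take_succ_cons, List.foldl_cons]
      exact ih _ j (by simpa using h)

-- offsets[k] is the prefix sum over the first k lines, for k ≤ n
theorem pvOffsets_get (xs : List String) (k : Nat) (hk : k ≤ xs.length) :
    PySem.List.pyGetD (([0] : List Int) ++ pvAux xs 0) (k : Int) 0 =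
      (xs.take k).foldl (fun acc l => acc + (PySem.Str.len l + 1)) 0 := by
  rw [PySem.List.pyGetD_natCast]
  cases k with
  | zero => simp
  | succ j =>
    have hj : j < xs.length := by omega
    have := pvAux_get xs 0 j hj
    simp [List.getD, this]

-- A's slice [:b] is the take of its clamped length, and pvClamp computes that length
theorem pvSlice_eq_take (xs : List String) (b : Int) :
    PySem.List.slice xs none (some b) = xs.take (pvClamp (xs.length : Int) b).toNat ∧
      (pvClamp (xs.length : Int) b).toNat ≤ xs.length := by
  by_cases hb : 0 ≤ b
  · rw [PySem.List.slice_to xs hb]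
    constructor
    · have : xs.take b.toNat = xs.take (min b.toNat xs.length) := by
        by_cases h : b.toNat ≤ xs.length
        · rw [Nat.min_eq_left h]
        · rw [Nat.min_eq_right (by omega), List.take_of_length_le (by omega),
            List.take_of_length_le (by omega)]
      rw [this]
      congr 1
      simp only [pvClamp]
      omega
    · simp only [pvClamp]; omega
  · obtain ⟨k, hk, rfl⟩ : ∃ k : Nat, 0 < k ∧ b = -(k : Int) :=
      ⟨(-b).toNat, by omega, by omega⟩
    rw [PySem.List.slice_to_neg_natCast xs k hk]
    constructor
    · congr 1
      simp only [pvClamp]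
      omega
    · simp only [pvClamp]; omega

theorem pvSide (xs : List String) (b : Int) :
    (PySem.List.slice xs none (some b)).foldl (fun acc line => acc + (PySem.Str.len line + 1)) 0 =
      PySem.List.pyGetD (([0] : List Int) ++ pvAux xs 0) (pvClamp (xs.length : Int) b) 0 := by
  obtain ⟨heq, hle⟩ := pvSlice_eq_take xs b
  have h0 : (0:Int) ≤ pvClamp (xs.length : Int) b := by simp only [pvClamp]; omega
  have hcast : pvClamp (xs.length : Int) b = ((pvClamp (xs.length : Int) b).toNat : Int) := by omega
  rw [heq, hcast, pvOffsets_get xs _ hle, Int.toNat_natCast]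

-- ===== VERDICT (by name: the statement is the Claim_ definition above) =====
theorem calculate_line_positions_py_spec : Claim_equal_calculate_line_positions_py := by
  intro content_lines start_line end_line content_length _
  unfold Spec_calculate_line_positions_py calculate_line_positions_py calculate_line_positions_py_alt
  simp only [pvFold_eq, pvSide]
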